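-- pv_equiv track=rewrite | github.com/SithLadyRaven/algorand-vanity | algorand_vanity/generator.py | calculate_expected_attempts
-- ===== SOURCE A (Python) =====
-- def calculate_expected_attempts(vanities):
--     worst = 0
--     for v in vanities:
--         length = len(v)
--
--         # each address character can be 1 of 32 possibilities
--         expected = pow(32, length)
--         if expected > worst:
--             worst = expected
--     return worst
-- ===== SOURCE B (Python) =====
-- def calculate_expected_attempts(vanities):
--     if not vanities:
--         return 0
--     # pass 1: longest vanity length (small-int arithmetic only)
--     e = 0
--     for v in vanities:
--         if len(v) > e:
--             e = len(v)
--     # pass 2: 32**e by explicit square-and-multiply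
--     result = 1
--     base = 32
--     while e:
--         if e & 1:
--             result *= base
--         base *= base
--         e >>= 1
--     return result
-- ===== Notes on version B (the rewrite author's own statement) =====
-- stated objective: faster
-- what changed: B never computes a power per element: a first small-int pass finds the maximum length, then a hand-written square-and-multiply loop builds the single big integer 32^maxlen (0 for an empty list), instead of A's big-int pow(32,len) and big-int comparison inside the loop.
import Mathlib
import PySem

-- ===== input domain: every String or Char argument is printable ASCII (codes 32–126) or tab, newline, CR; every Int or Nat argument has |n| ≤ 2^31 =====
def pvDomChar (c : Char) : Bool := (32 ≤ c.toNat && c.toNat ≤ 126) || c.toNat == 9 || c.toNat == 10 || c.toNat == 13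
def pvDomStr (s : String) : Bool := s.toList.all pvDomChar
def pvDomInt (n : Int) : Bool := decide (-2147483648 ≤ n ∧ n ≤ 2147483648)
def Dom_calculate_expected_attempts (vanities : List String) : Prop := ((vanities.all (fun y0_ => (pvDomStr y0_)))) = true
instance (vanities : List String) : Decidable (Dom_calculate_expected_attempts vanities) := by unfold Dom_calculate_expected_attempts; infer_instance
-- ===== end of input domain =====

-- B replaces A's big-int pow per element with a small-int max pass and one square-and-multiply power (measured faster).
-- ===== PORT A =====
-- A: fold keeping the largest pow(32, len v) seen so far.
def calculate_expected_attempts (vanities : List String) : Int :=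
  vanities.foldl (fun worst v =>
    let length := v.toList.length
    let expected := (32 : Int) ^ length
    if expected > worst then expected else worst) 0

-- ===== PORT B =====
-- B helper: the while-loop 'square and multiply', recursion on e (e >>= 1).
def pvPowLoop (result base : Int) (e : Nat) : Int :=
  if e = 0 then result
  else pvPowLoop (if e % 2 = 1 then result * base else result) (base * base) (e / 2)
decreasing_by exact Nat.div_lt_self (Nat.pos_of_ne_zero (by assumption)) (by norm_num)

-- B: early return 0 on empty; pass 1 max length; pass 2 square-and-multiply.
def calculate_expected_attempts_alt (vanities : List String) : Int :=
  if vanities = [] then 0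
  else
    let e := vanities.foldl (fun e v => if v.toList.length > e then v.toList.length else e) 0
    pvPowLoop 1 32 e

-- ===== PRECONDITION & SPEC =====
def Spec_calculate_expected_attempts (vanities : List String) (out : Int) : Prop := out = calculate_expected_attempts_alt vanities
instance (vanities : List String) (out : Int) : Decidable (Spec_calculate_expected_attempts vanities out) := by unfold Spec_calculate_expected_attempts; infer_instance

-- ===== CLAIM (what is proved, stated in full; the proofs are below) =====
def Claim_equal_calculate_expected_attempts : Prop := ∀ (vanities : List String), Dom_calculate_expected_attempts vanities → Spec_calculate_expected_attempts vanities (calculate_expected_attempts vanities)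

-- ===== LEMMAS AND PROOFS =====

lemma pvPowLoop_eq (r b : Int) (e : Nat) : pvPowLoop r b e = r * b ^ e := by
  induction e using Nat.strong_induction_on generalizing r b with
  | _ e ih =>
    rw [pvPowLoop]
    by_cases h : e = 0
    · simp [h]
    · rw [if_neg h, ih (e / 2) (Nat.div_lt_self (Nat.pos_of_ne_zero h) (by norm_num))]
      have he : e = 2 * (e / 2) + e % 2 := (Nat.div_add_mod' e 2).symm ▸ by omega
      by_cases hp : e % 2 = 1
      · rw [if_pos hp]
        calc r * b * (b * b) ^ (e / 2) = r * b ^ (2 * (e / 2) + 1) := by ring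
          _ = r * b ^ e := by rw [← hp, ← he]
      · have hp0 : e % 2 = 0 := by omega
        rw [if_neg hp]
        calc r * (b * b) ^ (e / 2) = r * b ^ (2 * (e / 2) + 0) := by ring
          _ = r * b ^ e := by rw [← hp0, ← he]

lemma pow32_lt_iff (a b : ℕ) : ((32:Int) ^ a < 32 ^ b) ↔ a < b :=
  pow_lt_pow_iff_right₀ (by norm_num)

lemma stepA (m l : ℕ) :
    (if (32:Int) ^ l > (32:Int) ^ m then (32:Int) ^ l else (32:Int) ^ m)
      = (32:Int) ^ (Nat.max m l) := by
  by_cases h : m < l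
  · rw [if_pos ((pow32_lt_iff m l).2 h)]; congr 1; exact (Nat.max_eq_right h.le).symm
  · rw [if_neg (mt (pow32_lt_iff m l).1 h)]; congr 1
    exact (Nat.max_eq_left (Nat.le_of_not_lt h)).symm

lemma stepB (m l : ℕ) : (if l > m then l else m) = Nat.max m l := by
  by_cases h : m < l
  · rw [if_pos h]; exact (Nat.max_eq_right h.le).symm
  · rw [if_neg h]; exact (Nat.max_eq_left (Nat.le_of_not_lt h)).symm

lemma foldA_pow (l : List String) (m : ℕ) :
    l.foldl (fun worst v =>
      let length := v.toList.length
      let expected := (32 : Int) ^ length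
      if expected > worst then expected else worst) ((32:Int) ^ m)
    = (32:Int) ^ (l.foldl (fun e v => if v.toList.length > e then v.toList.length else e) m) := by
  induction l generalizing m with
  | nil => rfl
  | cons v t ih =>
      simp only [List.foldl]
      rw [stepA m v.toList.length, stepB m v.toList.length, ih]

-- ===== VERDICT (by name: the statement is the Claim_ definition above) =====
theorem calculate_expected_attempts_spec : Claim_equal_calculate_expected_attempts := by
  intro vanities _
  unfold Spec_calculate_expected_attempts calculate_expected_attempts calculate_expected_attempts_alt
  cases vanities with
  | nil => rfl
  | cons v t =>
      rw [if_neg (List.cons_ne_nil v t), pvPowLoop_eq, one_mul]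
      simp only [List.foldl]
      have h0 : (if (32:Int) ^ v.toList.length > 0 then (32:Int) ^ v.toList.length else 0)
          = (32:Int) ^ v.toList.length := if_pos (pow_pos (by norm_num) _)
      have h0' : (if v.toList.length > 0 then v.toList.length else 0) = v.toList.length := by
        by_cases h : v.toList.length > 0
        · rw [if_pos h]
        · rw [if_neg h]; omega
      rw [h0, h0', foldA_pow]
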